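-- pv_equiv track=rewrite | github.com/AdamZhouSE/pythonHomework | Code/CodeRecords/2524/60614/246327.py | check
-- ===== SOURCE A (Python) =====
-- def check(nums):
--     if len(nums)>1:
--         left=[]
--         right=[]
--         for i in range(1,len(nums)):
--             if nums[i]<nums[0]:
--                 left.append(nums[i])
--             else:
--                 right.append(nums[i])
--         return [nums[0]]+check(left)+check(right)
--     else:
--         return nums
-- ===== SOURCE B (Python) =====
-- def check(nums):
--     root = None
--     for x in nums:
--         if root is None:
--             root = [x, None, None]
--             continue
--         cur = root
--         while True:
--             d = 1 if x < cur[0] else 2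
--             if cur[d] is None:
--                 cur[d] = [x, None, None]
--                 break
--             cur = cur[d]
--     out = []
--     stack = [root] if root is not None else []
--     while stack:
--         node = stack.pop()
--         out.append(node[0])
--         if node[2] is not None:
--             stack.append(node[2])
--         if node[1] is not None:
--             stack.append(node[1])
--     return out
-- ===== Notes on version B (the rewrite author's own statement) =====
-- stated objective: alternative
-- what changed: B builds the BST explicitly by iterative insertion of each element and then emits its preorder with an explicit stack, instead of A's recursive partition of the list around its first element; same worst-case cost.
import Mathlib
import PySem

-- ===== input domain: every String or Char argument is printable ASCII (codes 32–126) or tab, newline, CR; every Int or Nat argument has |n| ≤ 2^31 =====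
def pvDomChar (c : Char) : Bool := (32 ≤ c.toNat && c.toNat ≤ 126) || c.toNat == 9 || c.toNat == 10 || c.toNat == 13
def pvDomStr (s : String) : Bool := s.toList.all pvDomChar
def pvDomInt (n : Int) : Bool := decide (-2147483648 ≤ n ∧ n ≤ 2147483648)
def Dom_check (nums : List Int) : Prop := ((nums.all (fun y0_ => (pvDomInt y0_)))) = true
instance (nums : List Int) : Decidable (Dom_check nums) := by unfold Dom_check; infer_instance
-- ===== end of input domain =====

-- B builds the BST by iterative insertion and emits its preorder with an explicit stack,
-- instead of A's recursive list partition around the head; an alternative algorithm of the same worst-case cost.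


-- ===== PORT A =====
-- the loop over range(1, len(nums)) appending nums[i] to left/right, as a fold over the tail
def splitStep (h0 : Int) (p : List Int × List Int) (x : Int) : List Int × List Int :=
  if x < h0 then (p.1 ++ [x], p.2) else (p.1, p.2 ++ [x])

-- characterisation of the loop's state, needed by check's termination proof
theorem splitFoldl (h0 : Int) (t a b : List Int) :
    t.foldl (splitStep h0) (a, b)
      = (a ++ t.filter (fun x => decide (x < h0)), b ++ t.filter (fun x => !decide (x < h0))) := by
  induction t generalizing a b with
  | nil => simp
  | cons x xs ih =>
    by_cases hx : x < h0 <;> simp [splitStep, hx, ih]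

def check (nums : List Int) : List Int :=
  if _hlen : nums.length > 1 then
    let h0 := nums.headI
    let t := nums.tail
    let lr := t.foldl (splitStep h0) ([], [])
    [h0] ++ check lr.1 ++ check lr.2
  else nums
termination_by nums.length
decreasing_by
  · simp only [splitFoldl]
    have := List.length_filter_le (fun x => decide (x < nums.headI)) nums.tail
    simp at this ⊢; omega
  · simp only [splitFoldl]
    have := List.length_filter_le (fun x => !decide (x < nums.headI)) nums.tail
    simp at this ⊢; omega

-- ===== PORT B =====
-- a node [x, left, right] with None children modelled as .leaf
inductive BTree where
  | leaf : BTree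
  | node : Int → BTree → BTree → BTree
deriving DecidableEq, Repr

-- the destructive descend-until-empty-slot while loop of Source B, as the recursion on the visited path
def bstInsert (t : BTree) (x : Int) : BTree :=
  match t with
  | .leaf => .node x .leaf .leaf
  | .node v l r => if x < v then .node v (bstInsert l x) r else .node v l (bstInsert r x)

def tsize : BTree → Nat
  | .leaf => 1
  | .node _ l r => 1 + tsize l + tsize r

-- needed by preorderLoop's termination proof
theorem tsize_pos (t : BTree) : 1 ≤ tsize t := by
  cases t <;> simp only [tsize] <;> omega

-- Source B's explicit-stack preorder loop: pop a node, emit its value, push right then left (left on top)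
def preorderLoop (stack : List BTree) (out : List Int) : List Int :=
  match stack with
  | [] => out
  | .leaf :: rest => preorderLoop rest out   -- unreachable in Source B (only non-None nodes are pushed)
  | .node v l r :: rest =>
      preorderLoop ((if l = .leaf then [] else [l]) ++ (if r = .leaf then [] else [r]) ++ rest)
        (out ++ [v])
termination_by (stack.map tsize).sum
decreasing_by
  · simp [tsize]
  · have hl := tsize_pos l
    have hr := tsize_pos r
    simp only [List.map_append, List.sum_append, tsize, List.map_cons, List.sum_cons]
    split_ifs <;> simp <;> omega

def check_alt (nums : List Int) : List Int :=
  let root := nums.foldl bstInsert .leaf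
  preorderLoop (if root = .leaf then [] else [root]) []

-- ===== PRECONDITION & SPEC =====
def Spec_check (nums : List Int) (out : List Int) : Prop := out = check_alt nums
instance (nums : List Int) (out : List Int) : Decidable (Spec_check nums out) := by unfold Spec_check; infer_instance

-- ===== CLAIM (what is proved, stated in full; the proofs are below) =====
def Claim_equal_check : Prop := ∀ (nums : List Int), Dom_check nums → Spec_check nums (check nums)

-- ===== LEMMAS AND PROOFS =====
def preorder : BTree → List Int
  | .leaf => []
  | .node v l r => [v] ++ preorder l ++ preorder r

theorem preorderLoop_eq (stack : List BTree) (out : List Int) :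
    preorderLoop stack out = out ++ (stack.map preorder).flatten := by
  induction stack, out using preorderLoop.induct with
  | case1 out => simp [preorderLoop]
  | case2 rest out ih => simp [preorderLoop, preorder, ih]
  | case3 out v l r st ih =>
    simp only [dite_eq_ite] at ih
    rw [preorderLoop, ih]
    by_cases hl : l = BTree.leaf <;> by_cases hr : r = BTree.leaf <;>
      simp [hl, hr, preorder]

theorem check_alt_eq (nums : List Int) :
    check_alt nums = preorder (nums.foldl bstInsert .leaf) := by
  unfold check_alt
  by_cases h : nums.foldl bstInsert .leaf = BTree.leaf <;>
    simp [h, preorderLoop_eq, preorder]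

theorem foldl_insert_node (xs : List Int) (v : Int) (l r : BTree) :
    xs.foldl bstInsert (.node v l r)
      = .node v ((xs.filter (fun x => decide (x < v))).foldl bstInsert l)
               ((xs.filter (fun x => !decide (x < v))).foldl bstInsert r) := by
  induction xs generalizing l r with
  | nil => simp
  | cons x xs ih =>
    by_cases hx : x < v <;> simp [bstInsert, hx, ih]

theorem check_eq_alt (n : Nat) : ∀ (nums : List Int), nums.length ≤ n → check nums = check_alt nums := by
  induction n with
  | zero =>
    intro nums h
    have : nums = [] := List.eq_nil_of_length_eq_zero (Nat.le_zero.mp h)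
    subst this; rw [check]; simp [check_alt_eq, preorder]
  | succ n ih =>
    intro nums h
    by_cases hlen : nums.length > 1
    · obtain ⟨h0, t, rfl⟩ : ∃ h0 t, nums = h0 :: t := by
        cases nums with
        | nil => simp at hlen
        | cons a b => exact ⟨a, b, rfl⟩
      rw [check]
      simp only [hlen, dif_pos, List.headI, List.tail_cons, splitFoldl, List.nil_append]
      have hL : (t.filter (fun x => decide (x < h0))).length ≤ n := by
        have := List.length_filter_le (fun x => decide (x < h0)) t
        simp at h; omega
      have hR : (t.filter (fun x => !decide (x < h0))).length ≤ n := by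
        have := List.length_filter_le (fun x => !decide (x < h0)) t
        simp at h; omega
      rw [ih _ hL, ih _ hR]
      simp [check_alt_eq, bstInsert, foldl_insert_node, preorder]
    · rw [check]
      simp only [hlen, dif_neg, not_false_iff]
      interval_cases hn : nums.length
      · have : nums = [] := List.eq_nil_of_length_eq_zero hn
        subst this; simp [check_alt_eq, preorder]
      · obtain ⟨a, rfl⟩ : ∃ a, nums = [a] := by
          cases nums with
          | nil => simp at hn
          | cons a b => cases b with
            | nil => exact ⟨a, rfl⟩
            | cons c d => simp at hn
        simp [check_alt_eq, preorder, bstInsert]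

-- ===== VERDICT (by name: the statement is the Claim_ definition above) =====
theorem check_spec : Claim_equal_check := by
  intro nums _
  unfold Spec_check
  exact check_eq_alt nums.length nums le_rfl
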